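-- pv_equiv track=rewrite | github.com/kevinkorfmann/watchgen | watchgen/mini_gamma_smc.py | segment_observations
-- ===== SOURCE A (Python) =====
-- def segment_observations(observations):
--     """Segment a sequence into (n_miss, n_hom, final_obs) tuples.
--
--     Consecutive missing and homozygous positions are grouped together.
--     Each segment ends at a heterozygous site or the end of the sequence.
--
--     Parameters
--     ----------
--     observations : list of int
--         Observation at each position: 1 (het), 0 (hom), -1 (missing).
--
--     Returns
--     -------
--     segments : list of (int, int, int)
--         Each tuple is (n_miss, n_hom, final_obs).
--     """
--     segments = []
--     n_miss = 0
--     n_hom = 0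
--
--     for y in observations:
--         if y == -1:  # missing
--             n_miss += 1
--         elif y == 0:  # hom
--             n_hom += 1
--         else:  # het (y == 1): close the current segment
--             segments.append((n_miss, n_hom, 1))
--             n_miss = 0
--             n_hom = 0
--
--     # Final segment (may end with hom or missing)
--     if n_miss > 0 or n_hom > 0:
--         segments.append((n_miss, n_hom, 0))
--
--     return segments
-- ===== SOURCE B (Python) =====
-- def segment_observations(observations):
--     """Split-then-count: partition into groups ended by each het, then count per group."""
--     groups = []
--     cur = []
--     for y in observations:
--         if y == -1 or y == 0:
--             cur.append(y)
--         else: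
--             groups.append((cur, True))
--             cur = []
--     if cur:
--         groups.append((cur, False))
--     return [(g.count(-1), g.count(0), 1 if het else 0) for (g, het) in groups]
-- ===== Notes on version B (the rewrite author's own statement) =====
-- stated objective: alternative
-- what changed: Replaces the incremental two-counter loop with a split-then-count decomposition: one pass partitions the observations into het-terminated groups (plus a non-empty trailing group), then each group is counted with list.count.
import Mathlib
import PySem

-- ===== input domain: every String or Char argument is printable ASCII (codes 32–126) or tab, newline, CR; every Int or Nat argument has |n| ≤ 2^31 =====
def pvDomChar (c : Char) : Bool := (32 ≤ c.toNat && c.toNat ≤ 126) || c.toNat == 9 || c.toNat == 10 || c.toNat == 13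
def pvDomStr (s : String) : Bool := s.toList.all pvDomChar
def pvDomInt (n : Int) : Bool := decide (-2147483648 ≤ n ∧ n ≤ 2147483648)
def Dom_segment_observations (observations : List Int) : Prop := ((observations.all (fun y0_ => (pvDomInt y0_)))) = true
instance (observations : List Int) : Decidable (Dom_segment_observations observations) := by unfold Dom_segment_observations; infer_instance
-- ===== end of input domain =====

-- B changes the decomposition: split-then-count (het-terminated groups, then count each group) instead of A's incremental two-counter loop; objective: alternative.

-- ===== PORT A =====
-- loop body of A: state = (segments, n_miss, n_hom)
def segStepA (st : List (Int × Int × Int) × Int × Int) (y : Int) : List (Int × Int × Int) × Int × Int :=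
  if y = -1 then (st.1, st.2.1 + 1, st.2.2)
  else if y = 0 then (st.1, st.2.1, st.2.2 + 1)
  else (st.1 ++ [(st.2.1, st.2.2, 1)], 0, 0)

def segment_observations (observations : List Int) : List (Int × Int × Int) :=
  let s := observations.foldl segStepA ([], 0, 0)
  if s.2.1 > 0 ∨ s.2.2 > 0 then s.1 ++ [(s.2.1, s.2.2, 0)] else s.1

-- ===== PORT B =====
-- loop body of B's grouping pass: state = (groups, cur)
def segStepB (st : List (List Int × Bool) × List Int) (y : Int) : List (List Int × Bool) × List Int :=
  if y = -1 ∨ y = 0 then (st.1, st.2 ++ [y])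
  else (st.1 ++ [(st.2, true)], [])

-- second pass: count one group (g.count(-1), g.count(0), 1 if het else 0)
def segCount (gb : List Int × Bool) : Int × Int × Int :=
  (PySem.List.count gb.1 (-1), PySem.List.count gb.1 0, if gb.2 then 1 else 0)

def segment_observations_alt (observations : List Int) : List (Int × Int × Int) :=
  let t := observations.foldl segStepB ([], [])
  let groups := if t.2 ≠ [] then t.1 ++ [(t.2, false)] else t.1
  groups.map segCount

-- ===== PRECONDITION & SPEC =====
def Spec_segment_observations (observations : List Int) (out : List (Int × Int × Int)) : Prop := out = segment_observations_alt observations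
instance (observations : List Int) (out : List (Int × Int × Int)) : Decidable (Spec_segment_observations observations out) := by unfold Spec_segment_observations; infer_instance

-- ===== CLAIM (what is proved, stated in full; the proofs are below) =====
def Claim_equal_segment_observations : Prop := ∀ (observations : List Int), Dom_segment_observations observations → Spec_segment_observations observations (segment_observations observations)

-- ===== LEMMAS AND PROOFS =====

lemma segCount_false (cur : List Int) :
    segCount (cur, false) = ((PySem.List.count cur (-1) : Int), (PySem.List.count cur 0 : Int), (0 : Int)) := rfl

-- invariant linking A's counters to B's current group
lemma seg_loop_eq (obs : List Int) : ∀ (groups : List (List Int × Bool)) (cur : List Int),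
    (∀ y ∈ cur, y = -1 ∨ y = 0) →
    (let s := obs.foldl segStepA (groups.map segCount, (PySem.List.count cur (-1) : Int), (PySem.List.count cur 0 : Int));
     if s.2.1 > 0 ∨ s.2.2 > 0 then s.1 ++ [(s.2.1, s.2.2, 0)] else s.1)
    = (let t := obs.foldl segStepB (groups, cur);
       (if t.2 ≠ [] then t.1 ++ [(t.2, false)] else t.1).map segCount) := by
  induction obs with
  | nil =>
    intro groups cur hcur
    simp only [List.foldl]
    by_cases h : cur = []
    · subst h
      simp [PySem.List.count]
    · have hpos : (PySem.List.count cur (-1) : Int) > 0 ∨ (PySem.List.count cur 0 : Int) > 0 := by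
        obtain ⟨x, xs, rfl⟩ := List.exists_cons_of_ne_nil h
        rcases hcur x (by simp) with hx | hx <;> subst hx <;>
          simp [PySem.List.count_eq]
      simp only [if_pos hpos, if_pos h]
      simp [segCount_false]
  | cons y ys ih =>
    intro groups cur hcur
    simp only [List.foldl]
    by_cases h1 : y = -1
    · subst h1
      have : segStepA (groups.map segCount, (PySem.List.count cur (-1) : Int), (PySem.List.count cur 0 : Int)) (-1)
          = (groups.map segCount, (PySem.List.count (cur ++ [-1]) (-1) : Int), (PySem.List.count (cur ++ [-1]) 0 : Int)) := by
        simp [segStepA, PySem.List.count_eq]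
      rw [this]
      have hB : segStepB (groups, cur) (-1) = (groups, cur ++ [-1]) := by simp [segStepB]
      rw [hB]
      have hcur' : ∀ z ∈ cur ++ [-1], z = -1 ∨ z = 0 := by
        intro z hz
        rcases List.mem_append.1 hz with h | h
        · exact hcur z h
        · simp at h; left; exact h
      exact ih groups (cur ++ [-1]) hcur'
    · by_cases h2 : y = 0
      · subst h2
        have : segStepA (groups.map segCount, (PySem.List.count cur (-1) : Int), (PySem.List.count cur 0 : Int)) 0
            = (groups.map segCount, (PySem.List.count (cur ++ [0]) (-1) : Int), (PySem.List.count (cur ++ [0]) 0 : Int)) := by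
          simp [segStepA, PySem.List.count_eq]
        rw [this]
        have hB : segStepB (groups, cur) 0 = (groups, cur ++ [0]) := by simp [segStepB]
        rw [hB]
        have hcur' : ∀ z ∈ cur ++ [0], z = -1 ∨ z = 0 := by
          intro z hz
          rcases List.mem_append.1 hz with h | h
          · exact hcur z h
          · simp at h; right; exact h
        exact ih groups (cur ++ [0]) hcur'
      · have hA : segStepA (groups.map segCount, (PySem.List.count cur (-1) : Int), (PySem.List.count cur 0 : Int)) y
            = ((groups ++ [(cur, true)]).map segCount, (PySem.List.count ([] : List Int) (-1) : Int), (PySem.List.count ([] : List Int) 0 : Int)) := by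
          simp [segStepA, h1, h2, segCount, PySem.List.count]
        rw [hA]
        have hB : segStepB (groups, cur) y = (groups ++ [(cur, true)], []) := by
          simp [segStepB, h1, h2]
        rw [hB]
        exact ih (groups ++ [(cur, true)]) [] (by simp)

-- ===== VERDICT (by name: the statement is the Claim_ definition above) =====
theorem segment_observations_spec : Claim_equal_segment_observations := by
  intro observations _
  unfold Spec_segment_observations segment_observations segment_observations_alt
  have := seg_loop_eq observations [] [] (by simp)
  simpa [PySem.List.count] using this
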